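-- pv_equiv track=rewrite | github.com/Gabreu05/BusinessWebsite | export_static_site.py | rewrite_static_urls
-- ===== SOURCE A (Python) =====
-- def rewrite_static_urls(html: str) -> str:
--     """Convert /static references to relative static/ for file:// usage."""
--     replacements = [
--         ('href="/static/', 'href="static/'),
--         ("href='/static/", "href='static/"),
--         ('src="/static/', 'src="static/'),
--         ("src='/static/", "src='static/"),
--         ('url(/static/', 'url(static/'),
--     ]
--     for needle, replacement in replacements:
--         html = html.replace(needle, replacement)
--     return html
-- ===== SOURCE B (Python) =====
-- def rewrite_static_urls(html: str) -> str:
--     """Convert /static references to relative static/ for file:// usage.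
--
--     Single left-to-right scan: at each position, if one of the five
--     rewrite rules matches here, emit the replacement and jump past the
--     match; otherwise copy one character.  (A instead performs five
--     sequential full-string replace passes.)
--     """
--     rules = [(p + '/static/', p + 'static/')
--              for p in ('href="', "href='", 'src="', "src='", 'url(')]
--     out = []
--     i = 0
--     n = len(html)
--     while i < n:
--         for needle, replacement in rules:
--             if html.startswith(needle, i):
--                 out.append(replacement)
--                 i += len(needle)
--                 break
--         else:
--             out.append(html[i])
--             i += 1
--     return ''.join(out)
-- ===== Notes on version B (the rewrite author's own statement) =====
-- stated objective: alternative
-- what changed: B replaces the five sequential full-string .replace() passes by one left-to-right scan that at each position matches one of the five needles (emitting the prefix with the slash dropped and jumping past the match) or copies a character, so the string is traversed once instead of five times.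
import Mathlib
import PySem

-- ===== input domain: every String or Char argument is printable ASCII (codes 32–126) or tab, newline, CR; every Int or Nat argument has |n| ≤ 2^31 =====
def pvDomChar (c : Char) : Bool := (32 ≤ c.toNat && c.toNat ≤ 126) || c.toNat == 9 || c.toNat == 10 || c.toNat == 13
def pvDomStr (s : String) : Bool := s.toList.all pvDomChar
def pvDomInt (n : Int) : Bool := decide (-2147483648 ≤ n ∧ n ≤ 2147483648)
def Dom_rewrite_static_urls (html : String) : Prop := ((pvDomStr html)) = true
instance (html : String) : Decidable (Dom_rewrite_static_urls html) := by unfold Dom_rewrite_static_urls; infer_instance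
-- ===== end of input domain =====

-- B is one left-to-right scan over the characters instead of A's five sequential
-- full-string replace passes; proved to return the same string on every input.

-- ===== PORT A =====
def rewrite_static_urls (html : String) : String :=
  [("href=\"/static/", "href=\"static/"),
   ("href='/static/", "href='static/"),
   ("src=\"/static/", "src=\"static/"),
   ("src='/static/", "src='static/"),
   ("url(/static/", "url(static/")].foldl
    (fun h nr => PySem.Str.replace h nr.1 nr.2) html

-- ===== PORT B =====
-- the while-loop of Source B: at each position try the five rules in order, else copy one char
def pvScan : List Char → List Char
  | [] => []
  | c :: t =>
    if PySem.Chars.startswith (c :: t) "href=\"/static/".toList then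
      "href=\"static/".toList ++ pvScan ((c :: t).drop 14)
    else if PySem.Chars.startswith (c :: t) "href='/static/".toList then
      "href='static/".toList ++ pvScan ((c :: t).drop 14)
    else if PySem.Chars.startswith (c :: t) "src=\"/static/".toList then
      "src=\"static/".toList ++ pvScan ((c :: t).drop 13)
    else if PySem.Chars.startswith (c :: t) "src='/static/".toList then
      "src='static/".toList ++ pvScan ((c :: t).drop 13)
    else if PySem.Chars.startswith (c :: t) "url(/static/".toList then
      "url(static/".toList ++ pvScan ((c :: t).drop 12)
    else c :: pvScan t
  termination_by l => l.length
  decreasing_by all_goals (simp; try omega)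

def rewrite_static_urls_alt (html : String) : String :=
  String.ofList (pvScan html.toList)

-- ===== PRECONDITION & SPEC =====
def Spec_rewrite_static_urls (html : String) (out : String) : Prop := out = rewrite_static_urls_alt html
instance (html : String) (out : String) : Decidable (Spec_rewrite_static_urls html out) := by unfold Spec_rewrite_static_urls; infer_instance

-- ===== CLAIM (what is proved, stated in full; the proofs are below) =====
def Claim_equal_rewrite_static_urls : Prop := ∀ (html : String), Dom_rewrite_static_urls html → Spec_rewrite_static_urls html (rewrite_static_urls html)

-- ===== LEMMAS AND PROOFS =====

-- the five needles and replacements as explicit character lists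
def pvN1 : List Char := ['h','r','e','f','=','"','/','s','t','a','t','i','c','/']
def pvN2 : List Char := ['h','r','e','f','=','\'','/','s','t','a','t','i','c','/']
def pvN3 : List Char := ['s','r','c','=','"','/','s','t','a','t','i','c','/']
def pvN4 : List Char := ['s','r','c','=','\'','/','s','t','a','t','i','c','/']
def pvN5 : List Char := ['u','r','l','(','/','s','t','a','t','i','c','/']
def pvR1 : List Char := ['h','r','e','f','=','"','s','t','a','t','i','c','/']
def pvR2 : List Char := ['h','r','e','f','=','\'','s','t','a','t','i','c','/']
def pvR3 : List Char := ['s','r','c','=','"','s','t','a','t','i','c','/']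
def pvR4 : List Char := ['s','r','c','=','\'','s','t','a','t','i','c','/']
def pvR5 : List Char := ['u','r','l','(','s','t','a','t','i','c','/']

-- simple structural model of CPython's str.replace for a nonempty needle
def pvRep (old new : List Char) : List Char → List Char
  | [] => []
  | c :: t =>
    if old.isPrefixOf (c :: t) then new ++ pvRep old new (t.drop (old.length - 1))
    else c :: pvRep old new t
  termination_by l => l.length
  decreasing_by all_goals (simp; try omega)

-- A's five passes, innermost applied first
def pvComp (l : List Char) : List Char :=
  pvRep pvN5 pvR5 (pvRep pvN4 pvR4 (pvRep pvN3 pvR3 (pvRep pvN2 pvR2 (pvRep pvN1 pvR1 l))))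

lemma pvRep_nil (old new : List Char) : pvRep old new [] = [] := by rw [pvRep]

lemma pvGo_eq (old new : List Char) (h : old ≠ []) :
    ∀ fuel l acc, l.length ≤ fuel →
      PySem.Chars.replace.go old new fuel l acc = acc.reverse ++ pvRep old new l := by
  intro fuel
  induction fuel with
  | zero =>
    intro l acc hl
    have hnil : l = [] := List.length_eq_zero_iff.mp (Nat.le_zero.mp hl)
    subst hnil
    simp [PySem.Chars.replace.go, pvRep_nil]
  | succ fuel ih =>
    intro l acc hl
    cases l with
    | nil => simp [PySem.Chars.replace.go, pvRep_nil]
    | cons c t =>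
      rw [PySem.Chars.replace.go]
      obtain ⟨k, hk⟩ : ∃ k, old.length = k + 1 := by
        cases old with
        | nil => exact absurd rfl h
        | cons a o => exact ⟨o.length, rfl⟩
      by_cases hp : old.isPrefixOf (c :: t) = true
      · rw [if_pos hp]
        rw [ih (List.drop old.length (c :: t)) (new.reverse ++ acc) (by simp at hl ⊢; omega)]
        rw [pvRep, if_pos hp]
        simp [hk, List.append_assoc]
      · rw [if_neg hp]
        rw [ih t (c :: acc) (by simpa using Nat.le_of_succ_le_succ hl)]
        rw [pvRep, if_neg hp]
        simp

lemma pvReplace_eq (s old new : List Char) (h : old ≠ []) :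
    PySem.Chars.replace s old new = pvRep old new s := by
  have he : old.isEmpty = false := by
    cases old with
    | nil => exact absurd rfl h
    | cons a o => rfl
  rw [PySem.Chars.replace, he]
  simpa using pvGo_eq old new h s.length s [] le_rfl

lemma pvRep_cons_neg (old new : List Char) (c : Char) (t : List Char) (h : ¬ old <+: c :: t) :
    pvRep old new (c :: t) = c :: pvRep old new t := by
  rw [pvRep, if_neg (by simpa [List.isPrefixOf_iff_prefix] using h)]

lemma pvRep_match (old new : List Char) (h : old ≠ []) (t : List Char) :
    pvRep old new (old ++ t) = new ++ pvRep old new t := by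
  cases old with
  | nil => exact absurd rfl h
  | cons a o =>
    rw [List.cons_append, pvRep, if_pos]
    · simp
    · simp [List.isPrefixOf_iff_prefix]

lemma pv_not_prefix_append {a L : List Char} (t : List Char)
    (h1 : ¬ a <+: L) (h2 : ¬ L <+: a) : ¬ a <+: L ++ t := by
  intro h
  exact (List.prefix_or_prefix_of_prefix h (List.prefix_append L t)).elim h1 h2

lemma pvRep_pass (old new L : List Char)
    (hside : ∀ s ∈ L.tails, s ≠ [] → ¬ s <+: old ∧ ¬ old <+: s) :
    ∀ t, pvRep old new (L ++ t) = L ++ pvRep old new t := by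
  induction L with
  | nil => simp
  | cons c L ih =>
    intro t
    have hcl := hside (c :: L) ((List.mem_tails _ _).mpr List.suffix_rfl) (by simp)
    have hnp : ¬ old <+: (c :: L) ++ t := pv_not_prefix_append t hcl.2 hcl.1
    rw [List.cons_append, pvRep_cons_neg old new c (L ++ t) (by simpa using hnp)]
    rw [ih (fun s hs hne => hside s ((List.mem_tails _ _).mpr
      (((List.mem_tails _ _).mp hs).trans (List.suffix_cons c L))) hne) t]
    simp

lemma pvRep_reflect (old new P : List Char)
    (hside : ∀ s ∈ P.tails, s ≠ [] → ¬ s <+: new ∧ ¬ new <+: s) :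
    ∀ x p, p <:+ P → p <+: pvRep old new x → p <+: x := by
  intro x
  induction x with
  | nil =>
    intro p hp h
    rw [pvRep_nil] at h
    exact h
  | cons c t ih =>
    intro p hp h
    cases p with
    | nil => exact List.nil_prefix
    | cons a p' =>
      by_cases hm : old.isPrefixOf (c :: t) = true
      · rw [pvRep, if_pos hm] at h
        have hside' := hside (a :: p') ((List.mem_tails _ _).mpr hp) (by simp)
        rcases List.prefix_or_prefix_of_prefix h (List.prefix_append new _) with h1 | h1
        · exact absurd h1 hside'.1
        · exact absurd h1 hside'.2
      · rw [pvRep, if_neg hm] at h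
        obtain ⟨rfl, hp'⟩ := List.cons_prefix_cons.mp h
        have hsub : p' <:+ P := (List.suffix_cons a p').trans hp
        exact List.cons_prefix_cons.mpr ⟨rfl, ih p' hsub hp'⟩

-- the needles' tails (used to reflect a would-be match back through earlier passes)
def pvP2 : List Char := ['r','e','f','=','\'','/','s','t','a','t','i','c','/']
def pvP3 : List Char := ['r','c','=','"','/','s','t','a','t','i','c','/']
def pvP4 : List Char := ['r','c','=','\'','/','s','t','a','t','i','c','/']
def pvP5 : List Char := ['r','l','(','/','s','t','a','t','i','c','/']

lemma pvT1 : "href=\"/static/".toList = pvN1 := rfl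
lemma pvT2 : "href='/static/".toList = pvN2 := rfl
lemma pvT3 : "src=\"/static/".toList = pvN3 := rfl
lemma pvT4 : "src='/static/".toList = pvN4 := rfl
lemma pvT5 : "url(/static/".toList = pvN5 := rfl
lemma pvS1 : "href=\"static/".toList = pvR1 := rfl
lemma pvS2 : "href='static/".toList = pvR2 := rfl
lemma pvS3 : "src=\"static/".toList = pvR3 := rfl
lemma pvS4 : "src='static/".toList = pvR4 := rfl
lemma pvS5 : "url(static/".toList = pvR5 := rfl

lemma pvScan_nil : pvScan [] = [] := by rw [pvScan]

lemma pvScan_cons (c : Char) (t : List Char) : pvScan (c :: t) =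
    if pvN1 <+: c :: t then pvR1 ++ pvScan ((c :: t).drop 14)
    else if pvN2 <+: c :: t then pvR2 ++ pvScan ((c :: t).drop 14)
    else if pvN3 <+: c :: t then pvR3 ++ pvScan ((c :: t).drop 13)
    else if pvN4 <+: c :: t then pvR4 ++ pvScan ((c :: t).drop 13)
    else if pvN5 <+: c :: t then pvR5 ++ pvScan ((c :: t).drop 12)
    else c :: pvScan t := by
  rw [pvScan]
  simp only [PySem.Chars.startswith_iff, pvT1, pvT2, pvT3, pvT4, pvT5,
    pvS1, pvS2, pvS3, pvS4, pvS5]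

lemma pvScan_m1 (t : List Char) : pvScan (pvN1 ++ t) = pvR1 ++ pvScan t := by
  have e : pvN1 ++ t = 'h' :: (pvN1.tail ++ t) := rfl
  rw [e, pvScan_cons, ← e, if_pos (List.prefix_append _ _),
    show (pvN1 ++ t).drop 14 = t by simp [pvN1]]

lemma pvScan_m2 (t : List Char) : pvScan (pvN2 ++ t) = pvR2 ++ pvScan t := by
  have e : pvN2 ++ t = 'h' :: (pvN2.tail ++ t) := rfl
  rw [e, pvScan_cons, ← e,
    if_neg (pv_not_prefix_append t (by decide) (by decide)),
    if_pos (List.prefix_append _ _),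
    show (pvN2 ++ t).drop 14 = t by simp [pvN2]]

lemma pvScan_m3 (t : List Char) : pvScan (pvN3 ++ t) = pvR3 ++ pvScan t := by
  have e : pvN3 ++ t = 's' :: (pvN3.tail ++ t) := rfl
  rw [e, pvScan_cons, ← e,
    if_neg (pv_not_prefix_append t (by decide) (by decide)),
    if_neg (pv_not_prefix_append t (by decide) (by decide)),
    if_pos (List.prefix_append _ _),
    show (pvN3 ++ t).drop 13 = t by simp [pvN3]]

lemma pvScan_m4 (t : List Char) : pvScan (pvN4 ++ t) = pvR4 ++ pvScan t := by
  have e : pvN4 ++ t = 's' :: (pvN4.tail ++ t) := rfl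
  rw [e, pvScan_cons, ← e,
    if_neg (pv_not_prefix_append t (by decide) (by decide)),
    if_neg (pv_not_prefix_append t (by decide) (by decide)),
    if_neg (pv_not_prefix_append t (by decide) (by decide)),
    if_pos (List.prefix_append _ _),
    show (pvN4 ++ t).drop 13 = t by simp [pvN4]]

lemma pvScan_m5 (t : List Char) : pvScan (pvN5 ++ t) = pvR5 ++ pvScan t := by
  have e : pvN5 ++ t = 'u' :: (pvN5.tail ++ t) := rfl
  rw [e, pvScan_cons, ← e,
    if_neg (pv_not_prefix_append t (by decide) (by decide)),
    if_neg (pv_not_prefix_append t (by decide) (by decide)),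
    if_neg (pv_not_prefix_append t (by decide) (by decide)),
    if_neg (pv_not_prefix_append t (by decide) (by decide)),
    if_pos (List.prefix_append _ _),
    show (pvN5 ++ t).drop 12 = t by simp [pvN5]]

lemma pvScan_char (c : Char) (t : List Char)
    (h1 : ¬ pvN1 <+: c :: t) (h2 : ¬ pvN2 <+: c :: t) (h3 : ¬ pvN3 <+: c :: t)
    (h4 : ¬ pvN4 <+: c :: t) (h5 : ¬ pvN5 <+: c :: t) :
    pvScan (c :: t) = c :: pvScan t := by
  rw [pvScan_cons, if_neg h1, if_neg h2, if_neg h3, if_neg h4, if_neg h5]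

lemma pvMain : ∀ n l, l.length ≤ n → pvComp l = pvScan l := by
  intro n
  induction n with
  | zero =>
    intro l hl
    have hnil : l = [] := List.length_eq_zero_iff.mp (Nat.le_zero.mp hl)
    subst hnil
    simp only [pvComp, pvRep_nil, pvScan_nil]
  | succ n ih =>
    intro l hl
    by_cases h1 : pvN1 <+: l
    · obtain ⟨t, rfl⟩ := h1
      simp only [pvComp]
      rw [pvRep_match pvN1 pvR1 (by decide) t,
        pvRep_pass pvN2 pvR2 pvR1 (by decide) _,
        pvRep_pass pvN3 pvR3 pvR1 (by decide) _,
        pvRep_pass pvN4 pvR4 pvR1 (by decide) _,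
        pvRep_pass pvN5 pvR5 pvR1 (by decide) _,
        pvScan_m1]
      exact congrArg (pvR1 ++ ·) (ih t (by simp [pvN1] at hl; omega))
    by_cases h2 : pvN2 <+: l
    · obtain ⟨t, rfl⟩ := h2
      simp only [pvComp]
      rw [pvRep_pass pvN1 pvR1 pvN2 (by decide) _,
        pvRep_match pvN2 pvR2 (by decide) _,
        pvRep_pass pvN3 pvR3 pvR2 (by decide) _,
        pvRep_pass pvN4 pvR4 pvR2 (by decide) _,
        pvRep_pass pvN5 pvR5 pvR2 (by decide) _,
        pvScan_m2]
      exact congrArg (pvR2 ++ ·) (ih t (by simp [pvN2] at hl; omega))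
    by_cases h3 : pvN3 <+: l
    · obtain ⟨t, rfl⟩ := h3
      simp only [pvComp]
      rw [pvRep_pass pvN1 pvR1 pvN3 (by decide) _,
        pvRep_pass pvN2 pvR2 pvN3 (by decide) _,
        pvRep_match pvN3 pvR3 (by decide) _,
        pvRep_pass pvN4 pvR4 pvR3 (by decide) _,
        pvRep_pass pvN5 pvR5 pvR3 (by decide) _,
        pvScan_m3]
      exact congrArg (pvR3 ++ ·) (ih t (by simp [pvN3] at hl; omega))
    by_cases h4 : pvN4 <+: l
    · obtain ⟨t, rfl⟩ := h4
      simp only [pvComp]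
      rw [pvRep_pass pvN1 pvR1 pvN4 (by decide) _,
        pvRep_pass pvN2 pvR2 pvN4 (by decide) _,
        pvRep_pass pvN3 pvR3 pvN4 (by decide) _,
        pvRep_match pvN4 pvR4 (by decide) _,
        pvRep_pass pvN5 pvR5 pvR4 (by decide) _,
        pvScan_m4]
      exact congrArg (pvR4 ++ ·) (ih t (by simp [pvN4] at hl; omega))
    by_cases h5 : pvN5 <+: l
    · obtain ⟨t, rfl⟩ := h5
      simp only [pvComp]
      rw [pvRep_pass pvN1 pvR1 pvN5 (by decide) _,
        pvRep_pass pvN2 pvR2 pvN5 (by decide) _,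
        pvRep_pass pvN3 pvR3 pvN5 (by decide) _,
        pvRep_pass pvN4 pvR4 pvN5 (by decide) _,
        pvRep_match pvN5 pvR5 (by decide) _,
        pvScan_m5]
      exact congrArg (pvR5 ++ ·) (ih t (by simp [pvN5] at hl; omega))
    -- no rule matches at this position
    cases l with
    | nil => simp only [pvComp, pvRep_nil, pvScan_nil]
    | cons c t =>
      have k2 : ¬ pvN2 <+: c :: pvRep pvN1 pvR1 t := by
        intro hc
        obtain ⟨rfl, hp⟩ := List.cons_prefix_cons.mp hc
        exact h2 (List.cons_prefix_cons.mpr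
          ⟨rfl, pvRep_reflect pvN1 pvR1 pvP2 (by decide) t pvP2 List.suffix_rfl hp⟩)
      have k3 : ¬ pvN3 <+: c :: pvRep pvN2 pvR2 (pvRep pvN1 pvR1 t) := by
        intro hc
        obtain ⟨rfl, hp⟩ := List.cons_prefix_cons.mp hc
        exact h3 (List.cons_prefix_cons.mpr
          ⟨rfl, pvRep_reflect pvN1 pvR1 pvP3 (by decide) t pvP3 List.suffix_rfl
            (pvRep_reflect pvN2 pvR2 pvP3 (by decide) _ pvP3 List.suffix_rfl hp)⟩)
      have k4 : ¬ pvN4 <+: c :: pvRep pvN3 pvR3 (pvRep pvN2 pvR2 (pvRep pvN1 pvR1 t)) := by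
        intro hc
        obtain ⟨rfl, hp⟩ := List.cons_prefix_cons.mp hc
        exact h4 (List.cons_prefix_cons.mpr
          ⟨rfl, pvRep_reflect pvN1 pvR1 pvP4 (by decide) t pvP4 List.suffix_rfl
            (pvRep_reflect pvN2 pvR2 pvP4 (by decide) _ pvP4 List.suffix_rfl
              (pvRep_reflect pvN3 pvR3 pvP4 (by decide) _ pvP4 List.suffix_rfl hp))⟩)
      have k5 : ¬ pvN5 <+: c :: pvRep pvN4 pvR4 (pvRep pvN3 pvR3 (pvRep pvN2 pvR2 (pvRep pvN1 pvR1 t))) := by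
        intro hc
        obtain ⟨rfl, hp⟩ := List.cons_prefix_cons.mp hc
        exact h5 (List.cons_prefix_cons.mpr
          ⟨rfl, pvRep_reflect pvN1 pvR1 pvP5 (by decide) t pvP5 List.suffix_rfl
            (pvRep_reflect pvN2 pvR2 pvP5 (by decide) _ pvP5 List.suffix_rfl
              (pvRep_reflect pvN3 pvR3 pvP5 (by decide) _ pvP5 List.suffix_rfl
                (pvRep_reflect pvN4 pvR4 pvP5 (by decide) _ pvP5 List.suffix_rfl hp)))⟩)
      simp only [pvComp]
      rw [pvRep_cons_neg pvN1 pvR1 c t h1,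
        pvRep_cons_neg pvN2 pvR2 c _ k2,
        pvRep_cons_neg pvN3 pvR3 c _ k3,
        pvRep_cons_neg pvN4 pvR4 c _ k4,
        pvRep_cons_neg pvN5 pvR5 c _ k5,
        pvScan_char c t h1 h2 h3 h4 h5]
      exact congrArg (c :: ·) (ih t (Nat.le_of_succ_le_succ (by simpa using hl)))

-- ===== VERDICT (by name: the statement is the Claim_ definition above) =====
theorem rewrite_static_urls_spec : Claim_equal_rewrite_static_urls := by
  intro html _
  unfold Spec_rewrite_static_urls rewrite_static_urls rewrite_static_urls_alt
  simp only [List.foldl, PySem.Str.replace, String.toList_ofList]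
  rw [pvReplace_eq _ _ _ (by decide), pvReplace_eq _ _ _ (by decide),
    pvReplace_eq _ _ _ (by decide), pvReplace_eq _ _ _ (by decide),
    pvReplace_eq _ _ _ (by decide)]
  rw [pvT1, pvT2, pvT3, pvT4, pvT5, pvS1, pvS2, pvS3, pvS4, pvS5]
  exact congrArg String.ofList (pvMain html.toList.length html.toList le_rfl)
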